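-- pv_equiv track=rewrite | github.com/poachedeggstudio/StudyProject | 算法/石头变色.py | rock_colour
-- ===== SOURCE A (Python) =====
-- def rock_colour(rocks):
--     n = len(rocks)
--     if n % 2 != 0:
--         return -1
--
--     # 统计石头颜色总数
--     zero = 0
--     blue = 0
--     red = 0
--     cost = 0
--     for i in range(0, n):
--         colour = rocks[i][0]
--         if colour == 0:
--             zero += 1
--             cost += rocks[i][1]
--         elif colour == 1:
--             red += 1
--         else:
--             blue += 1
--
--     # 如果某颜色大于n/2则失败
--     if red > n / 2 or blue > n / 2:
--         return -1
--
--     # 排序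
--     new_rocks = sorted(rocks, key=lambda r: (r[0], r[2] - r[1]), reverse=False)
--
--     # 获取最小代价，cost+红变蓝色代价
--     # 需要变蓝的个数
--     blue = n // 2 - blue
--     for i in range(0, blue):
--         cost += new_rocks[i][2] - new_rocks[i][1]
--     return cost
-- ===== SOURCE B (Python) =====
-- import heapq
--
-- def rock_colour(rocks):
--     n = len(rocks)
--     if n % 2 != 0:
--         return -1
--     # one pass of counting via partitions instead of a 4-state loop
--     zeros = [r for r in rocks if r[0] == 0]
--     reds = [r for r in rocks if r[0] == 1]
--     others = n - len(zeros) - len(reds)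
--     if 2 * len(reds) > n or 2 * others > n:
--         return -1
--     base = sum(r[1] for r in zeros)
--     k = n // 2 - others
--     # heap selection of the k smallest (colour, r[2]-r[1]) keys instead of fully sorting the rocks
--     picks = heapq.nsmallest(k, ((r[0], r[2] - r[1]) for r in rocks))
--     return base + sum(d for _, d in picks)
-- ===== Notes on version B (the rewrite author's own statement) =====
-- stated objective: alternative
-- what changed: A's four-counter index loop plus a full stable sort of the rock records is replaced by list partitions for the counts/base cost and heap selection (heapq.nsmallest) of the k smallest (colour, r[2]-r[1]) keys.
import Mathlib
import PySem

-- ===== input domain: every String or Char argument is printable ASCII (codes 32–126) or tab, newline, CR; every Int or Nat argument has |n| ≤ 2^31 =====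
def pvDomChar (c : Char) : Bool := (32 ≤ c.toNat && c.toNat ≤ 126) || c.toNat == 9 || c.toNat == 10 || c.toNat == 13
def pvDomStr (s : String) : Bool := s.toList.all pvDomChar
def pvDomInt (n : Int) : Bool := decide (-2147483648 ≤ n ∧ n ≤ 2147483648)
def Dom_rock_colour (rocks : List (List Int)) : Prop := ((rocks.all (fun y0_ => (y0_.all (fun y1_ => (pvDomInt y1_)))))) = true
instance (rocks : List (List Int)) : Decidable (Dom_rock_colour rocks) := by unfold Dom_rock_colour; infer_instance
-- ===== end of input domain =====

-- B replaces A's four-counter index loop and full stable sort of the rocks by list partitions plus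
-- heap selection (ported as sorted-take) of the k smallest (colour, r[2]-r[1]) keys; equivalence of
-- the RETURN value is proved on Pre_ (exactly the inputs where the Python A returns without raising).

-- ===== PORT A =====
def rock_colour (rocks : List (List Int)) : Int :=
  let n : Int := rocks.length
  if PySem.Int.mod n 2 ≠ 0 then -1
  else
    let st := (PySem.List.pyRange 0 n 1).foldl
      (fun (st : Int × Int × Int × Int) i =>
        if PySem.List.pyGetD (PySem.List.pyGetD rocks i []) 0 0 = 0 then
          (st.1 + 1, st.2.1, st.2.2.1, st.2.2.2 + PySem.List.pyGetD (PySem.List.pyGetD rocks i []) 1 0)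
        else if PySem.List.pyGetD (PySem.List.pyGetD rocks i []) 0 0 = 1 then
          (st.1, st.2.1, st.2.2.1 + 1, st.2.2.2)
        else
          (st.1, st.2.1 + 1, st.2.2.1, st.2.2.2))
      ((0 : Int), (0 : Int), (0 : Int), (0 : Int))
    -- Python compares red > n / 2 in float; exact here since |n| ≤ 2^31: red > n/2 ⟺ 2*red > n
    if 2 * st.2.2.1 > n ∨ 2 * st.2.1 > n then -1
    else
      let new_rocks := PySem.List.sorted2 rocks
        (fun r => PySem.List.pyGetD r 0 0)
        (fun r => PySem.List.pyGetD r 2 0 - PySem.List.pyGetD r 1 0)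
      let need := PySem.Int.floordiv n 2 - st.2.1
      (PySem.List.pyRange 0 need 1).foldl
        (fun cost i => cost +
          (PySem.List.pyGetD (PySem.List.pyGetD new_rocks i []) 2 0 -
           PySem.List.pyGetD (PySem.List.pyGetD new_rocks i []) 1 0))
        st.2.2.2

-- ===== PORT B =====
def rock_colour_alt (rocks : List (List Int)) : Int :=
  let n : Int := rocks.length
  if PySem.Int.mod n 2 ≠ 0 then -1
  else
    let zeros := rocks.filter (fun r => PySem.List.pyGetD r 0 0 = 0)
    let reds := rocks.filter (fun r => PySem.List.pyGetD r 0 0 = 1)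
    let others : Int := n - zeros.length - reds.length
    if 2 * (reds.length : Int) > n ∨ 2 * others > n then -1
    else
      let base := (zeros.map (fun r => PySem.List.pyGetD r 1 0)).sum
      let k := PySem.Int.floordiv n 2 - others
      -- heapq.nsmallest(k, pairs) ported by its contract: sorted(pairs)[:k]
      let picks := (PySem.List.sorted2
          (rocks.map (fun r => (PySem.List.pyGetD r 0 0,
                                PySem.List.pyGetD r 2 0 - PySem.List.pyGetD r 1 0)))
          Prod.fst Prod.snd).take k.toNat
      base + (picks.map Prod.snd).sum

-- ===== PRECONDITION & SPEC =====
-- Pre_ is exactly the set of inputs on which the Python A returns: it excludes only the inputs where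
-- A raises IndexError (an even-length list containing a row too short for the accesses A performs
-- on the path it takes: rows need r[0], zero-coloured rows need r[1], and when no colour exceeds
-- n/2 the sort key needs r[2] of every row).
def Pre_rock_colour (rocks : List (List Int)) : Prop :=
  rocks.length % 2 = 1 ∨
  ((∀ r ∈ rocks, 1 ≤ r.length ∧ (r.getD 0 0 = 0 → 2 ≤ r.length)) ∧
   (2 * rocks.countP (fun r => decide (r.getD 0 0 = 1)) > rocks.length ∨
    2 * rocks.countP (fun r => decide (r.getD 0 0 ≠ 0 ∧ r.getD 0 0 ≠ 1)) > rocks.length ∨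
    ∀ r ∈ rocks, 3 ≤ r.length))
instance (rocks : List (List Int)) : Decidable (Pre_rock_colour rocks) := by
  unfold Pre_rock_colour; infer_instance
def pvWitness_rock_colour : List (List Int) := [[0, 1, 2], [1, 3, 4]]

def Spec_rock_colour (rocks : List (List Int)) (out : Int) : Prop := out = rock_colour_alt rocks
instance (rocks : List (List Int)) (out : Int) : Decidable (Spec_rock_colour rocks out) := by
  unfold Spec_rock_colour; infer_instance

-- ===== CLAIM (what is proved, stated in full; the proofs are below) =====
def Claim_equal_rock_colour : Prop := ∀ (rocks : List (List Int)), Dom_rock_colour rocks → Pre_rock_colour rocks → Spec_rock_colour rocks (rock_colour rocks)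

-- ===== LEMMAS AND PROOFS =====

-- insertBy commutes with map when the comparison factors through the map
theorem pv_insertBy_map {α β : Type} (f : α → β) (bef : α → α → Bool) (bef' : β → β → Bool)
    (h : ∀ a b, bef a b = bef' (f a) (f b)) (x : α) (ys : List α) :
    (PySem.List.insertBy bef x ys).map f = PySem.List.insertBy bef' (f x) (ys.map f) := by
  induction ys with
  | nil => simp [PySem.List.insertBy]
  | cons y ys ih =>
    simp only [PySem.List.insertBy, List.map_cons, ← h]
    by_cases hb : bef x y
    · simp [hb]
    · simp [hb, ih]

theorem pv_sorted2_map {α : Type} (k1 k2 : α → Int) (xs : List α) :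
    (PySem.List.sorted2 xs k1 k2 false).map (fun a => (k1 a, k2 a)) =
      PySem.List.sorted2 (xs.map (fun a => (k1 a, k2 a))) Prod.fst Prod.snd false := by
  unfold PySem.List.sorted2
  simp only []
  suffices h : ∀ acc : List α,
      (xs.foldl (fun acc x => PySem.List.insertBy
        (fun a b => decide (k1 a < k1 b) || (!decide (k1 b < k1 a) && decide (k2 a < k2 b))) x acc) acc).map (fun a => (k1 a, k2 a)) =
      (xs.map (fun a => (k1 a, k2 a))).foldl (fun acc p => PySem.List.insertBy
        (fun p q => decide (p.1 < q.1) || (!decide (q.1 < p.1) && decide (p.2 < q.2))) p acc) (acc.map (fun a => (k1 a, k2 a))) by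
    simpa using h []
  induction xs with
  | nil => intro acc; rfl
  | cons x xs ih =>
    intro acc
    simp only [List.foldl_cons, List.map_cons]
    rw [← pv_insertBy_map (fun a => (k1 a, k2 a)) _ _ (fun a b => rfl)]
    exact ih _

-- A's counting loop over indices, as a fold over the rows
theorem pv_countA (rocks : List (List Int)) (z b r c : Int) :
    rocks.foldl (fun (st : Int × Int × Int × Int) row =>
        if PySem.List.pyGetD row 0 0 = 0 then
          (st.1 + 1, st.2.1, st.2.2.1, st.2.2.2 + PySem.List.pyGetD row 1 0)
        else if PySem.List.pyGetD row 0 0 = 1 then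
          (st.1, st.2.1, st.2.2.1 + 1, st.2.2.2)
        else (st.1, st.2.1 + 1, st.2.2.1, st.2.2.2)) (z, b, r, c)
    = (z + ((rocks.filter (fun row => PySem.List.pyGetD row 0 0 = 0)).length : Int),
       b + ((rocks.length : Int)
            - ((rocks.filter (fun row => PySem.List.pyGetD row 0 0 = 0)).length : Int)
            - ((rocks.filter (fun row => PySem.List.pyGetD row 0 0 = 1)).length : Int)),
       r + ((rocks.filter (fun row => PySem.List.pyGetD row 0 0 = 1)).length : Int),
       c + ((rocks.filter (fun row => PySem.List.pyGetD row 0 0 = 0)).map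
              (fun row => PySem.List.pyGetD row 1 0)).sum) := by
  induction rocks generalizing z b r c with
  | nil => simp
  | cons row rest ih =>
    simp only [List.foldl_cons, List.filter_cons, List.length_cons]
    by_cases h0 : PySem.List.pyGetD row 0 0 = 0
    · simp [h0, ih]
      and_intros <;> (push_cast; ring)
    · by_cases h1 : PySem.List.pyGetD row 0 0 = 1
      · simp [h0, h1, ih]
        and_intros <;> (push_cast; ring)
      · simp [h0, h1, ih]
        and_intros <;> (push_cast; ring)

-- A's cost loop: sum of r[2]-r[1] over the first k sorted rows
theorem pv_sumA (s : List (List Int)) (k : Nat) (hk : k ≤ s.length) (c : Int) :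
    (PySem.List.pyRange 0 (k : Int) 1).foldl
      (fun cost i => cost +
        (PySem.List.pyGetD (PySem.List.pyGetD s i []) 2 0 -
         PySem.List.pyGetD (PySem.List.pyGetD s i []) 1 0)) c
    = c + ((s.take k).map
        (fun row => PySem.List.pyGetD row 2 0 - PySem.List.pyGetD row 1 0)).sum := by
  induction k generalizing c with
  | zero => simp [PySem.List.pyRange_one_eq_nil]
  | succ m ih =>
    have hm : m ≤ s.length := Nat.le_of_succ_le hk
    have hms : m < s.length := hk
    have hsplit : PySem.List.pyRange 0 ((m : Int) + 1) 1
        = PySem.List.pyRange 0 (m : Int) 1 ++ [(m : Int)] :=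
      PySem.List.pyRange_one_succ_right (by positivity)
    have : ((m + 1 : Nat) : Int) = (m : Int) + 1 := by push_cast; ring
    rw [this, hsplit, List.foldl_append, ih hm]
    simp only [List.foldl_cons, List.foldl_nil]
    have hget : PySem.List.pyGetD s (m : Int) [] = s[m] := by
      simp [PySem.List.pyGetD_natCast, List.getD_eq_getElem?_getD, hms]
    rw [hget]
    rw [List.take_succ]
    simp [hms, List.sum_append]
    ring

theorem pv_filter_le (rocks : List (List Int)) :
    (rocks.filter (fun row => PySem.List.pyGetD row 0 0 = 0)).length +
    (rocks.filter (fun row => PySem.List.pyGetD row 0 0 = 1)).length ≤ rocks.length := by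
  induction rocks with
  | nil => simp
  | cons row rest ih =>
    simp only [List.filter_cons, List.length_cons]
    by_cases h0 : PySem.List.pyGetD row 0 0 = 0
    · simp [h0, (by simp [h0] : ¬ PySem.List.pyGetD row 0 0 = 1)]; omega
    · by_cases h1 : PySem.List.pyGetD row 0 0 = 1
      · simp [h0, h1]; omega
      · simp [h0, h1]; omega


theorem pv_ports_agree (rocks : List (List Int)) : rock_colour rocks = rock_colour_alt rocks := by
  by_cases hpar : PySem.Int.mod (rocks.length : Int) 2 ≠ 0
  · simp only [rock_colour, rock_colour_alt, if_pos hpar]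
  · simp only [rock_colour, rock_colour_alt, if_neg hpar]
    rw [PySem.List.foldl_pyRange_zero_pyGetD' rocks ([] : List Int)
      (fun (st : Int × Int × Int × Int) row =>
        if PySem.List.pyGetD row 0 0 = 0 then
          (st.1 + 1, st.2.1, st.2.2.1, st.2.2.2 + PySem.List.pyGetD row 1 0)
        else if PySem.List.pyGetD row 0 0 = 1 then
          (st.1, st.2.1, st.2.2.1 + 1, st.2.2.2)
        else (st.1, st.2.1 + 1, st.2.2.1, st.2.2.2)) ((0:Int), (0:Int), (0:Int), (0:Int))]
    rw [pv_countA]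
    simp only [zero_add]
    set Z := (List.filter (fun row => decide (PySem.List.pyGetD row 0 0 = 0)) rocks).length with hZ
    set R := (List.filter (fun row => decide (PySem.List.pyGetD row 0 0 = 1)) rocks).length with hR
    by_cases hcond : 2 * (R:Int) > (rocks.length:Int) ∨ 2 * ((rocks.length:Int) - (Z:Int) - (R:Int)) > (rocks.length:Int)
    · simp only [if_pos hcond]
    · simp only [if_neg hcond]
      push_neg at hcond
      obtain ⟨hc1, hc2⟩ := hcond
      have hfl : PySem.Int.floordiv (rocks.length : Int) 2 = (rocks.length : Int) / 2 :=
        PySem.Int.floordiv_eq_ediv_of_pos (by norm_num)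
      have hle := pv_filter_le rocks
      have hlen : (PySem.List.sorted2 rocks
          (fun r => PySem.List.pyGetD r 0 0)
          (fun r => PySem.List.pyGetD r 2 0 - PySem.List.pyGetD r 1 0) false).length = rocks.length :=
        (PySem.List.sorted2_perm rocks _ _ false).length_eq
      set need : Int := PySem.Int.floordiv (rocks.length : Int) 2 - ((rocks.length:Int) - (Z:Int) - (R:Int)) with hneed
      have hneed0 : 0 ≤ need := by rw [hneed, hfl]; omega
      have hneedle : need.toNat ≤ rocks.length := by
        rw [hneed, hfl] at *; omega
      have hcast : need = ((need.toNat : Nat) : Int) := (Int.toNat_of_nonneg hneed0).symm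
      rw [hcast, pv_sumA _ _ (by rw [hlen]; exact hneedle)]
      rw [← pv_sorted2_map]
      rw [← List.map_take, List.map_map]
      have hmax : max need 0 = need := max_eq_left hneed0
      simp only [Int.toNat_of_nonneg hneed0] <;> rfl

-- ===== VERDICT (by name: the statement is the Claim_ definition above) =====
theorem rock_colour_spec : Claim_equal_rock_colour := by
  intro rocks _ _
  unfold Spec_rock_colour
  exact pv_ports_agree rocks
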